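-- pv_equiv track=rewrite | github.com/bingleilou/PolyLUT-Add | src/polylut/nn.py | InputTerms
-- ===== SOURCE A (Python) =====
-- import itertools
--
-- def InputTerms(fan_in, degree):
--     return list(
--         itertools.chain(
--             *[
--                 list(itertools.combinations_with_replacement(range(fan_in), d + 1))
--                 for d in range(degree)
--             ]
--         )
--     )
-- ===== SOURCE B (Python) =====
-- def InputTerms(fan_in, degree):
--     # Hand-written recursive enumerator: cwr(start, k) lists, in lexicographic
--     # order, the nondecreasing k-tuples over range(start, fan_in).
--     def cwr(start, k):
--         if k == 0:
--             return [()]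
--         return [(v,) + t for v in range(start, fan_in) for t in cwr(v, k - 1)]
--     out = []
--     for k in range(1, degree + 1):
--         out += cwr(0, k)
--     return out
-- ===== Notes on version B (the rewrite author's own statement) =====
-- stated objective: alternative
-- what changed: Replaces the itertools.chain/combinations_with_replacement pipeline with a hand-written recursion cwr(start,k) that extends tuples by values >= the current lower bound, emitting the same lexicographic order.
import Mathlib
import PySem

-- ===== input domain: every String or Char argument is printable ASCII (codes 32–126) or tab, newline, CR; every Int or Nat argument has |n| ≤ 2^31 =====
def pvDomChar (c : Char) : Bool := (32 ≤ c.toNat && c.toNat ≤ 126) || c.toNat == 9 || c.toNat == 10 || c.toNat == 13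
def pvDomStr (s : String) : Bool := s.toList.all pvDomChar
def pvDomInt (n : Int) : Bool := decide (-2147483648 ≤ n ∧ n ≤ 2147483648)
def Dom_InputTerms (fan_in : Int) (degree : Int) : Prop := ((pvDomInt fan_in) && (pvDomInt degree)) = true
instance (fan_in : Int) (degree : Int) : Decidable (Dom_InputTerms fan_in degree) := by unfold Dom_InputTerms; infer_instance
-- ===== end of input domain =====

-- B replaces the itertools pipeline by a hand-written bounded recursion; same output, alternative structure.

-- ===== PORT A =====
-- itertools.combinations_with_replacement(pool, r) in lexicographic order over a
-- sorted pool, modelled by the standard pool recursion (exact for sorted pools,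
-- and range(fan_in) is sorted): tuples starting with pool.head first.
def cwrA : List Int → Nat → List (List Int)
  | _, 0 => [[]]
  | [], _ + 1 => []
  | x :: xs, k + 1 => (cwrA (x :: xs) k).map (fun t => x :: t) ++ cwrA xs (k + 1)
termination_by pool k => (k, pool.length)

-- list(chain(*[list(cwr(range(fan_in), d+1)) for d in range(degree)]))
def InputTerms (fan_in : Int) (degree : Int) : List (List Int) :=
  ((PySem.List.pyRange 0 degree 1).map
    (fun d => cwrA (PySem.List.pyRange 0 fan_in 1) (d + 1).toNat)).flatten

-- ===== PORT B =====
-- def cwr(start, k): if k == 0: return [()]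
--   return [(v,)+t for v in range(start, fan_in) for t in cwr(v, k-1)]
def cwrB (fan_in : Int) (start : Int) : Nat → List (List Int)
  | 0 => [[]]
  | k + 1 => (PySem.List.pyRange start fan_in 1).flatMap
      (fun v => (cwrB fan_in v k).map (fun t => v :: t))

-- out = []; for k in range(1, degree+1): out += cwr(0, k); return out
def InputTerms_alt (fan_in : Int) (degree : Int) : List (List Int) :=
  (PySem.List.pyRange 1 (degree + 1) 1).foldl
    (fun out k => out ++ cwrB fan_in 0 k.toNat) []

-- ===== PRECONDITION & SPEC =====
def Spec_InputTerms (fan_in : Int) (degree : Int) (out : List (List Int)) : Prop := out = InputTerms_alt fan_in degree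
instance (fan_in : Int) (degree : Int) (out : List (List Int)) : Decidable (Spec_InputTerms fan_in degree out) := by unfold Spec_InputTerms; infer_instance

-- ===== CLAIM (what is proved, stated in full; the proofs are below) =====
def Claim_equal_InputTerms : Prop := ∀ (fan_in : Int) (degree : Int), Dom_InputTerms fan_in degree → Spec_InputTerms fan_in degree (InputTerms fan_in degree)

-- ===== LEMMAS AND PROOFS =====

-- Core bridge: the pool recursion over range(a, n) equals B's bounded recursion.
theorem cwrA_eq_cwrB (n : Int) (k : Nat) (a : Int) :
    cwrA (PySem.List.pyRange a n 1) k = cwrB n a k := by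
  match k with
  | 0 =>
    cases h : PySem.List.pyRange a n 1 <;> simp [cwrA, cwrB]
  | k + 1 =>
    by_cases h : a < n
    · have e1 : PySem.List.pyRange a n 1 = a :: PySem.List.pyRange (a+1) n 1 :=
        PySem.List.pyRange_one_cons h
      have e2 : cwrB n (a+1) (k+1) = (PySem.List.pyRange (a+1) n 1).flatMap
          (fun v => (cwrB n v k).map (fun t => v :: t)) := by rw [cwrB]
      rw [cwrB, e1, List.flatMap_cons, ← e2, cwrA, ← e1,
        cwrA_eq_cwrB n k a, cwrA_eq_cwrB n (k+1) (a+1)]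
    · rw [PySem.List.pyRange_one_eq_nil (by omega), cwrB,
        PySem.List.pyRange_one_eq_nil (by omega)]
      simp [cwrA]
termination_by (k, (n - a).toNat)
decreasing_by
  · exact Prod.Lex.left _ _ (by omega)
  · exact Prod.Lex.right _ (by omega)

theorem InputTerms_spec : Claim_equal_InputTerms := by
  intro fan_in degree _
  unfold Spec_InputTerms InputTerms InputTerms_alt
  rw [PySem.List.foldl_append_eq_flatMap, List.nil_append]
  simp only [cwrA_eq_cwrB, ← List.flatMap_def]
  rw [PySem.List.pyRange_one (a := 0) (b := degree),
      PySem.List.pyRange_one (a := 1) (b := degree + 1)]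
  have hlen : (degree - 0).toNat = (degree + 1 - 1).toNat := by omega
  rw [hlen]
  simp only [List.flatMap_map]
  congr 1
  funext k
  have h1 : ((1 : Int) + (k : Int)).toNat = k + 1 := by omega
  simp [h1]
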